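-- pv_equiv track=rewrite | github.com/kushasareen/energy_loss | e3_diffusion_for_molecules/rigidity/generate_sym_dataset_geom.py | get_orbits
-- ===== SOURCE A (Python) =====
-- from collections import defaultdict
--
-- def get_orbits(automorphisms, num_nodes): # works
--     # Create a dictionary to store the orbit of each node
--     orbit_map = defaultdict(set)
--
--     # For each automorphism, update the orbit map
--     for automorphism in automorphisms:
--         for i, j in enumerate(automorphism):
--             orbit_map[i].add(j)
--             orbit_map[j].add(i)
--
--     # Create a list of sets for unique orbits
--     visited = set()
--     orbits = []
--
--     for node in range(num_nodes):
--         if node not in visited: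
--             # Use a set to find all connected nodes in the orbit
--             orbit = set()
--             stack = [node]
--             while stack:
--                 current = stack.pop()
--                 if current not in visited:
--                     visited.add(current)
--                     orbit.add(current)
--                     stack.extend(orbit_map[current])
--             orbits.append(orbit)
--
--     # Map nodes to their orbit index
--     orbit_indices = [-1] * num_nodes
--     for index, orbit in enumerate(orbits):
--         for node in orbit:
--             orbit_indices[node] = index
--
--     return orbit_indices
-- ===== SOURCE B (Python) =====
-- def get_orbits(automorphisms, num_nodes):
--     # Quick-find union of labels: comp[v] = smallest node known connected to v.
--     if num_nodes <= 0:
--         return []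
--     comp = list(range(num_nodes))
--     for automorphism in automorphisms:
--         for i, j in enumerate(automorphism):
--             a, b = comp[i], comp[j]
--             if a != b:
--                 lo, hi = (a, b) if a < b else (b, a)
--                 for k in range(num_nodes):
--                     if comp[k] == hi:
--                         comp[k] = lo
--     # relabel component minima by first-encounter order
--     labels = {}
--     out = []
--     for c in comp:
--         if c not in labels:
--             labels[c] = len(labels)
--         out.append(labels[c])
--     return out
-- ===== Notes on version B (the rewrite author's own statement) =====
-- stated objective: alternative
-- what changed: A builds an adjacency defaultdict and runs an explicit-stack DFS from each unvisited node to collect orbit sets before a final index-writing pass; B keeps a single quick-find label array comp (comp[v] = smallest node known connected to v), merges the two labels per automorphism edge, and relabels by first encounter in one sweep.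
-- outside the precondition, e.g. on get_orbits([[2, -1, 0]], 3): A returns [0, 1, 1], B returns [0, 0, 0]; on get_orbits([[0, 2]], 1): A returns [0], B raises IndexError
import Mathlib
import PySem

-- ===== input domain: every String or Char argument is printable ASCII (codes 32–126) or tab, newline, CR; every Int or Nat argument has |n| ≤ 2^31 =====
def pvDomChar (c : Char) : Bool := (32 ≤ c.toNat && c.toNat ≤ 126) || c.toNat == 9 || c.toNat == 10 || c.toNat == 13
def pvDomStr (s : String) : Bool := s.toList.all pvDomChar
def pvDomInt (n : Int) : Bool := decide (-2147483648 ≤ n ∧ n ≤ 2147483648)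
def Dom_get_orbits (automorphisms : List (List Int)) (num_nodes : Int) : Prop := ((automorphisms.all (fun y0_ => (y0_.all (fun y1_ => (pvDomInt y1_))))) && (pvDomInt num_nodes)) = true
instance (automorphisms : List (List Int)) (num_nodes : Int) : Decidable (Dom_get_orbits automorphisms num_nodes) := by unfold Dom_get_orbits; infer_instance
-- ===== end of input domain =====

-- B replaces A's adjacency-dict + explicit-stack DFS per start node by a single quick-find label
-- array merged per edge (objective: alternative algorithm; equivalence is on the return value).

-- ===== PORT A =====
-- orbit_map is a defaultdict(set); 'orbit_map[i].add(j)' is Dict.modify with default empty set.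
def pvOrbitMap (automorphisms : List (List Int)) : PySem.Dict Int (PySem.Set Int) :=
  automorphisms.foldl (fun om automorphism =>
    (PySem.List.enumerate automorphism 0).foldl (fun om ij =>
      let om1 := PySem.Dict.modify om ij.1 PySem.Set.empty (fun s => PySem.Set.add s ij.2)
      PySem.Dict.modify om1 ij.2 PySem.Set.empty (fun s => PySem.Set.add s ij.1)) om)
    PySem.Dict.empty

-- fuel bound for the 'while stack:' loop (every iteration pops once; proved sufficient below)
def pvFuel (om : PySem.Dict Int (PySem.Set Int)) : Nat :=
  2 + ((PySem.Dict.items om).map (fun kv => 1 + kv.2.length)).sum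

-- 'while stack: current = stack.pop(); …'.  'stack.extend(orbit_map[current])' pushes the
-- neighbour set's elements (order cannot affect the returned value); the defaultdict's silent
-- insertion of an empty set for a missing key is omitted: every later read uses default ∅ anyway.
def pvDfs (om : PySem.Dict Int (PySem.Set Int)) :
    Nat → List Int → PySem.Set Int → PySem.Set Int → PySem.Set Int × PySem.Set Int
  | 0, _, visited, orbit => (visited, orbit)
  | Nat.succ fuel, stack, visited, orbit =>
    match stack.getLast? with
    | none => (visited, orbit)
    | some current =>
      let stack' := stack.dropLast
      if PySem.Set.contains visited current then pvDfs om fuel stack' visited orbit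
      else pvDfs om fuel (stack' ++ PySem.Dict.getD om current PySem.Set.empty)
             (PySem.Set.add visited current) (PySem.Set.add orbit current)

def pvScan (om : PySem.Dict Int (PySem.Set Int)) (num_nodes : Int) :
    PySem.Set Int × List (PySem.Set Int) :=
  (PySem.List.pyRange 0 num_nodes 1).foldl (fun st node =>
    if PySem.Set.contains st.1 node then st
    else
      let r := pvDfs om (pvFuel om) [node] st.1 PySem.Set.empty
      (r.1, st.2 ++ [r.2]))
    (PySem.Set.empty, [])

-- 'orbit_indices[node] = index' ported with the total pySetD: exact under Pre_ (indices in range).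
def get_orbits (automorphisms : List (List Int)) (num_nodes : Int) : List Int :=
  let om := pvOrbitMap automorphisms
  let orbits := (pvScan om num_nodes).2
  (PySem.List.enumerate orbits 0).foldl (fun oi io =>
      io.2.foldl (fun oi node => PySem.List.pySetD oi node io.1) oi)
    (PySem.List.pyRepeat [(-1 : Int)] num_nodes)

-- ===== PORT B =====
-- 'comp[i]', 'comp[j]', 'comp[k] = lo' ported with the total pyGetD/pySetD: exact under Pre_.
def pvUnionEdge (num_nodes : Int) (comp : List Int) (ij : Int × Int) : List Int :=
  let a := PySem.List.pyGetD comp ij.1 0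
  let b := PySem.List.pyGetD comp ij.2 0
  if a == b then comp
  else
    let lo := if a < b then a else b
    let hi := if a < b then b else a
    (PySem.List.pyRange 0 num_nodes 1).foldl
      (fun comp k => if PySem.List.pyGetD comp k 0 == hi then PySem.List.pySetD comp k lo else comp)
      comp

def pvComp (automorphisms : List (List Int)) (num_nodes : Int) : List Int :=
  automorphisms.foldl (fun comp automorphism =>
    (PySem.List.enumerate automorphism 0).foldl (fun comp ij => pvUnionEdge num_nodes comp ij) comp)
    (PySem.List.pyRange 0 num_nodes 1)

def get_orbits_alt (automorphisms : List (List Int)) (num_nodes : Int) : List Int :=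
  if num_nodes ≤ 0 then []
  else
    let comp := pvComp automorphisms num_nodes
    (comp.foldl (fun (st : PySem.Dict Int Int × List Int) c =>
        let labels := if PySem.Dict.contains st.1 c then st.1
                      else PySem.Dict.insert st.1 c (PySem.Dict.size st.1 : Int)
        (labels, st.2 ++ [PySem.Dict.getD labels c 0]))
      (PySem.Dict.empty, ([] : List Int))).2

-- ===== PRECONDITION & SPEC =====
-- Pre_ excludes, for num_nodes > 0, automorphism rows longer than num_nodes or with entries
-- outside [0, num_nodes): there A raises IndexError when such a node is reachable from a node
-- scanned in range(num_nodes), and on negative entries in [-num_nodes, 0) A silently writes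
-- through Python's negative-index wraparound, an accident of the list-assignment encoding.
def Pre_get_orbits (automorphisms : List (List Int)) (num_nodes : Int) : Prop :=
  0 < num_nodes → ∀ row ∈ automorphisms,
    (row.length : Int) ≤ num_nodes ∧ ∀ j ∈ row, 0 ≤ j ∧ j < num_nodes

instance (automorphisms : List (List Int)) (num_nodes : Int) :
    Decidable (Pre_get_orbits automorphisms num_nodes) := by
  unfold Pre_get_orbits; infer_instance

def pvWitness_get_orbits : List (List Int) × Int := ([[1, 0, 2], [0, 2, 1]], 3)

def Spec_get_orbits (automorphisms : List (List Int)) (num_nodes : Int) (out : List Int) : Prop :=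
  out = get_orbits_alt automorphisms num_nodes

instance (automorphisms : List (List Int)) (num_nodes : Int) (out : List Int) :
    Decidable (Spec_get_orbits automorphisms num_nodes out) := by
  unfold Spec_get_orbits; infer_instance

-- ===== CLAIM (what is proved, stated in full; the proofs are below) =====
def Claim_equal_get_orbits : Prop :=
  ∀ (automorphisms : List (List Int)) (num_nodes : Int),
    Dom_get_orbits automorphisms num_nodes → Pre_get_orbits automorphisms num_nodes →
    Spec_get_orbits automorphisms num_nodes (get_orbits automorphisms num_nodes)

-- ===== LEMMAS AND PROOFS =====

-- ---------- the connectivity relation generated by the enumerated pairs ----------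
def pvPairs (automorphisms : List (List Int)) : List (Int × Int) :=
  automorphisms.flatMap (fun row => PySem.List.enumerate row 0)

def pvStep (E : List (Int × Int)) (x y : Int) : Prop := (x, y) ∈ E ∨ (y, x) ∈ E

def pvConn (E : List (Int × Int)) : Int → Int → Prop := Relation.ReflTransGen (pvStep E)

lemma pvStep_symm {E : List (Int × Int)} {x y : Int} (h : pvStep E x y) : pvStep E y x := h.symm

lemma pvConn_symm {E : List (Int × Int)} {x y : Int} (h : pvConn E x y) : pvConn E y x :=
  Relation.ReflTransGen.symmetric (fun _ _ h => pvStep_symm h) h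

lemma pvConn_nil {x y : Int} : pvConn [] x y ↔ x = y := by
  constructor
  · intro h
    induction h with
    | refl => rfl
    | tail _ hs _ => exact absurd hs (by simp [pvStep])
  · rintro rfl; exact Relation.ReflTransGen.refl

lemma pvConn_mono {E E' : List (Int × Int)} (hsub : ∀ p ∈ E, p ∈ E') {x y : Int}
    (h : pvConn E x y) : pvConn E' x y := by
  induction h with
  | refl => exact Relation.ReflTransGen.refl
  | tail _ hs ih => exact ih.tail (hs.imp (hsub _) (hsub _))

lemma pvStep_append_iff {E : List (Int × Int)} {i j x y : Int} :
    pvStep (E ++ [(i, j)]) x y ↔ pvStep E x y ∨ (x = i ∧ y = j) ∨ (x = j ∧ y = i) := by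
  simp [pvStep, Prod.ext_iff]; tauto

lemma pvConn_append_iff {E : List (Int × Int)} {i j x y : Int} :
    pvConn (E ++ [(i, j)]) x y ↔
      pvConn E x y ∨ (pvConn E x i ∧ pvConn E j y) ∨ (pvConn E x j ∧ pvConn E i y) := by
  constructor
  · intro h
    induction h with
    | refl => exact Or.inl Relation.ReflTransGen.refl
    | tail _ hs ih =>
      rw [pvStep_append_iff] at hs
      rcases hs with hs | ⟨rfl, rfl⟩ | ⟨rfl, rfl⟩
      · rcases ih with ih | ⟨h1, h2⟩ | ⟨h1, h2⟩
        · exact Or.inl (ih.tail hs)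
        · exact Or.inr (Or.inl ⟨h1, h2.tail hs⟩)
        · exact Or.inr (Or.inr ⟨h1, h2.tail hs⟩)
      · rcases ih with ih | ⟨h1, h2⟩ | ⟨h1, h2⟩
        · exact Or.inr (Or.inl ⟨ih, Relation.ReflTransGen.refl⟩)
        · exact Or.inr (Or.inl ⟨h1, Relation.ReflTransGen.refl⟩)
        · exact Or.inl h1
      · rcases ih with ih | ⟨h1, h2⟩ | ⟨h1, h2⟩
        · exact Or.inr (Or.inr ⟨ih, Relation.ReflTransGen.refl⟩)
        · exact Or.inl h1
        · exact Or.inr (Or.inr ⟨h1, Relation.ReflTransGen.refl⟩)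
  · have hsub : ∀ p ∈ E, p ∈ E ++ [(i, j)] := fun p hp => List.mem_append_left _ hp
    have hstep : pvConn (E ++ [(i, j)]) i j :=
      Relation.ReflTransGen.single (Or.inl (List.mem_append_right _ (List.mem_singleton_self _)))
    rintro (h | ⟨h1, h2⟩ | ⟨h1, h2⟩)
    · exact pvConn_mono hsub h
    · exact ((pvConn_mono hsub h1).trans hstep).trans (pvConn_mono hsub h2)
    · exact ((pvConn_mono hsub h1).trans
        (Relation.ReflTransGen.single (Or.inr (List.mem_append_right _ (List.mem_singleton_self _))))).trans
        (pvConn_mono hsub h2)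

lemma pvConn_bounds {E : List (Int × Int)} {n : Int}
    (hE : ∀ p ∈ E, (0 ≤ p.1 ∧ p.1 < n) ∧ (0 ≤ p.2 ∧ p.2 < n)) {u x : Int}
    (h : pvConn E u x) (hu : 0 ≤ u ∧ u < n) : 0 ≤ x ∧ x < n := by
  induction h with
  | refl => exact hu
  | tail _ hs ih =>
    rcases hs with hs | hs
    · exact (hE _ hs).2
    · exact (hE _ hs).1

lemma pvPairs_bounds {automorphisms : List (List Int)} {num_nodes : Int}
    (hpre : Pre_get_orbits automorphisms num_nodes) (h0 : 0 < num_nodes) :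
    ∀ p ∈ pvPairs automorphisms, (0 ≤ p.1 ∧ p.1 < num_nodes) ∧ (0 ≤ p.2 ∧ p.2 < num_nodes) := by
  intro p hp
  unfold pvPairs at hp
  rw [List.mem_flatMap] at hp
  obtain ⟨row, hrow, hpe⟩ := hp
  rw [PySem.List.mem_enumerate_iff] at hpe
  obtain ⟨k, hk, rfl⟩ := hpe
  obtain ⟨hlen, hent⟩ := hpre h0 row hrow
  refine ⟨⟨by simp, ?_⟩, ?_⟩
  · simp only [zero_add]
    have : (k : Int) < (row.length : Int) := by exact_mod_cast hk
    omega
  · exact hent _ (List.getElem_mem _)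

lemma foldl_rows {β : Type} (f : β → (Int × Int) → β) (automorphisms : List (List Int)) (init : β) :
    automorphisms.foldl (fun acc row => (PySem.List.enumerate row 0).foldl f acc) init
      = (pvPairs automorphisms).foldl f init := by
  unfold pvPairs
  rw [List.flatMap_def, List.foldl_flatten, List.foldl_map]

-- ---------- B-side: comp[v] is the minimum of v's connected component ----------
def pvCompInv (E : List (Int × Int)) (n : Int) (comp : List Int) : Prop :=
  comp.length = n.toNat ∧ ∀ v : Int, 0 ≤ v → v < n →
    (pvConn E (PySem.List.pyGetD comp v 0) v ∧ 0 ≤ PySem.List.pyGetD comp v 0 ∧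
     ∀ u : Int, 0 ≤ u → pvConn E u v → PySem.List.pyGetD comp v 0 ≤ u)

-- derived facts about μ := pvComp
lemma mu_eq_iff {E : List (Int × Int)} {n : Int} {μ : List Int} (hinv : pvCompInv E n μ)
    {u v : Int} (hu : 0 ≤ u ∧ u < n) (hv : 0 ≤ v ∧ v < n) :
    PySem.List.pyGetD μ u 0 = PySem.List.pyGetD μ v 0 ↔ pvConn E u v := by
  obtain ⟨hcu, hnu, hmu⟩ := hinv.2 u hu.1 hu.2
  obtain ⟨hcv, hnv, hmv⟩ := hinv.2 v hv.1 hv.2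
  constructor
  · intro h
    exact ((pvConn_symm hcu).trans (h ▸ hcv))
  · intro h
    have h1 : PySem.List.pyGetD μ u 0 ≤ PySem.List.pyGetD μ v 0 :=
      hmu _ hnv (hcv.trans (pvConn_symm h))
    have h2 : PySem.List.pyGetD μ v 0 ≤ PySem.List.pyGetD μ u 0 :=
      hmv _ hnu (hcu.trans h)
    omega

lemma mu_le_self {E : List (Int × Int)} {n : Int} {μ : List Int} (hinv : pvCompInv E n μ)
    {v : Int} (hv : 0 ≤ v ∧ v < n) : PySem.List.pyGetD μ v 0 ≤ v :=
  (hinv.2 v hv.1 hv.2).2.2 v hv.1 Relation.ReflTransGen.refl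

lemma mu_fixed {E : List (Int × Int)} {n : Int} {μ : List Int} (hinv : pvCompInv E n μ)
    {v : Int} (hv : 0 ≤ v ∧ v < n) :
    PySem.List.pyGetD μ (PySem.List.pyGetD μ v 0) 0 = PySem.List.pyGetD μ v 0 := by
  obtain ⟨hcv, hnv, hmv⟩ := hinv.2 v hv.1 hv.2
  have hb : 0 ≤ PySem.List.pyGetD μ v 0 ∧ PySem.List.pyGetD μ v 0 < n :=
    ⟨hnv, by have := mu_le_self hinv hv; omega⟩
  exact (mu_eq_iff hinv hb hv).2 hcv

lemma sweep_spec (lo hi : Int) :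
    ∀ (L : List Int) (cur : List Int), lo ≠ hi → (∀ k ∈ L, 0 ≤ k ∧ k < (cur.length : Int)) →
    (L.foldl (fun c k => if PySem.List.pyGetD c k 0 == hi then PySem.List.pySetD c k lo else c) cur).length = cur.length ∧
    ∀ v : Int, 0 ≤ v →
      PySem.List.pyGetD (L.foldl (fun c k => if PySem.List.pyGetD c k 0 == hi then PySem.List.pySetD c k lo else c) cur) v 0
        = if v ∈ L ∧ PySem.List.pyGetD cur v 0 = hi then lo else PySem.List.pyGetD cur v 0 := by
  intro L
  induction L with
  | nil => exact fun cur _ _ => ⟨rfl, fun v _ => by simp⟩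
  | cons k L ih =>
    intro cur hne hb
    obtain ⟨hk0, hklen⟩ := hb k List.mem_cons_self
    have hkcast : ((k.toNat : Nat) : Int) = k := Int.toNat_of_nonneg hk0
    have hklt : k.toNat < cur.length := by omega
    set c1 := if PySem.List.pyGetD cur k 0 == hi then PySem.List.pySetD cur k lo else cur with hc1
    have hlen1 : c1.length = cur.length := by
      rw [hc1]; split
      · exact PySem.List.length_pySetD cur k lo
      · rfl
    have hval : ∀ v : Int, 0 ≤ v → PySem.List.pyGetD c1 v 0 =
        if v = k ∧ PySem.List.pyGetD cur k 0 = hi then lo else PySem.List.pyGetD cur v 0 := by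
      intro v hv
      rw [hc1]
      by_cases hkh : PySem.List.pyGetD cur k 0 = hi
      · rw [if_pos (by simpa using hkh)]
        by_cases hvk : v = k
        · have hgoal : PySem.List.pyGetD (PySem.List.pySetD cur k lo) v 0 = lo := by
            rw [hvk, ← hkcast,
              PySem.List.pyGetD_pySetD_natCast cur k.toNat k.toNat lo 0 hklt]
            simp
          rw [hgoal, if_pos ⟨hvk, hkh⟩]
        · rw [if_neg (fun h => hvk h.1)]
          by_cases hvlen : v < (cur.length : Int)
          · have hvn : ((v.toNat : Nat) : Int) = v := Int.toNat_of_nonneg hv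
            rw [← hkcast, ← hvn, PySem.List.pyGetD_pySetD_natCast cur k.toNat v.toNat lo 0 hklt,
              if_neg (by omega), hvn]
          · rw [PySem.List.pyGetD_of_nonneg _ _ hv, PySem.List.pyGetD_of_nonneg _ _ hv]
            rw [List.getD_eq_getElem?_getD, List.getD_eq_getElem?_getD]
            rw [List.getElem?_eq_none (l := PySem.List.pySetD cur k lo)
              (by rw [PySem.List.length_pySetD]; omega), List.getElem?_eq_none (by omega)]
      · rw [if_neg (by simpa using hkh), if_neg (fun h => hkh h.2)]
    have hb' : ∀ x ∈ L, 0 ≤ x ∧ x < (c1.length : Int) := by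
      rw [hlen1]; exact fun x hx => hb x (List.mem_cons_of_mem _ hx)
    obtain ⟨ihl, ihg⟩ := ih c1 hne hb'
    constructor
    · simp only [List.foldl_cons]
      rw [← hc1, ihl, hlen1]
    · intro v hv
      simp only [List.foldl_cons]
      rw [← hc1, ihg v hv]
      have hc1v := hval v hv
      by_cases hvk : v = k
      · by_cases hvh : PySem.List.pyGetD cur v 0 = hi
        · rw [if_pos ⟨hvk, hvk ▸ hvh⟩] at hc1v
          rw [hc1v, if_neg (fun h => hne h.2), if_pos ⟨hvk ▸ List.mem_cons_self, hvh⟩]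
        · rw [if_neg (fun h => hvh (hvk ▸ h.2))] at hc1v
          rw [hc1v, if_neg (fun h => hvh h.2), if_neg (fun h => hvh h.2)]
      · rw [if_neg (fun h => hvk h.1)] at hc1v
        rw [hc1v]
        by_cases hvL : v ∈ L
        · by_cases hvh : PySem.List.pyGetD cur v 0 = hi
          · rw [if_pos ⟨hvL, hvh⟩, if_pos ⟨List.mem_cons_of_mem _ hvL, hvh⟩]
          · rw [if_neg (fun h => hvh h.2), if_neg (fun h => hvh h.2)]
        · rw [if_neg (fun h => hvL h.1), if_neg (fun h => hvL (by
            rcases List.mem_cons.1 h.1 with h' | h'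
            · exact absurd h' hvk
            · exact h'))]

lemma unionEdge_inv {E : List (Int × Int)} {n : Int} {comp : List Int}
    (hinv : pvCompInv E n comp) {p : Int × Int}
    (hp : (0 ≤ p.1 ∧ p.1 < n) ∧ (0 ≤ p.2 ∧ p.2 < n)) :
    pvCompInv (E ++ [p]) n (pvUnionEdge n comp p) := by
  obtain ⟨hlen, hv⟩ := hinv
  obtain ⟨hp1, hp2⟩ := hp
  have hsub : ∀ q ∈ E, q ∈ E ++ [p] := fun q hq => List.mem_append_left _ hq
  have hedge : pvConn (E ++ [p]) p.1 p.2 :=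
    Relation.ReflTransGen.single (Or.inl (List.mem_append_right _ (List.mem_singleton_self _)))
  have happ : ∀ x y : Int, pvConn (E ++ [p]) x y ↔
      pvConn E x y ∨ (pvConn E x p.1 ∧ pvConn E p.2 y) ∨ (pvConn E x p.2 ∧ pvConn E p.1 y) := by
    intro x y
    exact pvConn_append_iff (i := p.1) (j := p.2) (E := E)
  obtain ⟨hci, hni, hmi⟩ := hv p.1 hp1.1 hp1.2
  obtain ⟨hcj, hnj, hmj⟩ := hv p.2 hp2.1 hp2.2
  unfold pvUnionEdge
  by_cases hab : PySem.List.pyGetD comp p.1 0 = PySem.List.pyGetD comp p.2 0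
  · rw [if_pos (by simpa using hab)]
    have hij : pvConn E p.1 p.2 := (mu_eq_iff ⟨hlen, hv⟩ hp1 hp2).1 hab
    refine ⟨hlen, fun v h0 hn => ?_⟩
    obtain ⟨hcv, hnv, hmv⟩ := hv v h0 hn
    refine ⟨pvConn_mono hsub hcv, hnv, fun u hu hconn => ?_⟩
    rcases (happ u v).1 hconn with h | ⟨h1, h2⟩ | ⟨h1, h2⟩
    · exact hmv u hu h
    · exact hmv u hu ((h1.trans hij).trans h2)
    · exact hmv u hu ((h1.trans (pvConn_symm hij)).trans h2)
  · rw [if_neg (by simpa using hab)]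
    set a := PySem.List.pyGetD comp p.1 0 with ha
    set b := PySem.List.pyGetD comp p.2 0 with hb
    set lo := if a < b then a else b with hlo
    set hi := if a < b then b else a with hhi
    have hlohi : lo ≠ hi := by rw [hlo, hhi]; split <;> omega
    have hlolt : lo ≤ hi := by rw [hlo, hhi]; split <;> omega
    have hbnds : ∀ k ∈ PySem.List.pyRange 0 n 1, 0 ≤ k ∧ k < (comp.length : Int) := by
      intro k hk
      rw [PySem.List.mem_pyRange_one] at hk
      have : (comp.length : Int) = n := by rw [hlen]; omega
      omega
    obtain ⟨hslen, hsval⟩ := sweep_spec lo hi (PySem.List.pyRange 0 n 1) comp hlohi hbnds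
    refine ⟨by rw [hslen, hlen], fun v h0 hn => ?_⟩
    obtain ⟨hcv, hnv, hmv⟩ := hv v h0 hn
    have hvrange : v ∈ PySem.List.pyRange 0 n 1 := PySem.List.mem_pyRange_one.2 ⟨h0, hn⟩
    rw [hsval v h0]
    -- value of the merged component minimum
    by_cases hvh : PySem.List.pyGetD comp v 0 = hi
    · rw [if_pos ⟨hvrange, hvh⟩]
      -- v lies in the class whose old minimum is hi; new minimum is lo
      by_cases hab2 : a < b
      · -- hi = b = min of p.2's class, lo = a
        have hhi' : hi = b := by rw [hhi, if_pos hab2]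
        have hlo' : lo = a := by rw [hlo, if_pos hab2]
        have hconnjv : pvConn E v p.2 := (mu_eq_iff ⟨hlen, hv⟩ ⟨h0, hn⟩ hp2).1 (by rw [← hb, ← hhi', hvh])
        refine ⟨?_, by rw [hlo']; exact hni, ?_⟩
        · -- pvConn (E++[p]) lo v
          rw [hlo']
          exact (pvConn_mono hsub hci).trans (hedge.trans (pvConn_mono hsub (pvConn_symm hconnjv)))
        · intro u hu hconn
          rcases (happ u v).1 hconn with h | ⟨h1, h2⟩ | ⟨h1, h2⟩
          · -- u in v's old class: old min hi ≤ u, and lo ≤ hi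
            have := hmv u hu h
            omega
          · -- u ~ p.1 : a = lo ≤ u
            have := hmi u hu h1
            rw [hlo']; omega
          · -- u ~ p.2 : b ≤ u and lo ≤ b = hi
            have := hmj u hu h1
            omega
      · have hba : b < a := by omega
        have hhi' : hi = a := by rw [hhi, if_neg (by omega)]
        have hlo' : lo = b := by rw [hlo, if_neg (by omega)]
        have hconniv : pvConn E v p.1 := (mu_eq_iff ⟨hlen, hv⟩ ⟨h0, hn⟩ hp1).1 (by rw [← ha, ← hhi', hvh])
        refine ⟨?_, by rw [hlo']; exact hnj, ?_⟩
        · rw [hlo']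
          exact (pvConn_mono hsub hcj).trans ((pvConn_symm hedge).trans (pvConn_mono hsub (pvConn_symm hconniv)))
        · intro u hu hconn
          rcases (happ u v).1 hconn with h | ⟨h1, h2⟩ | ⟨h1, h2⟩
          · have := hmv u hu h
            omega
          · have := hmi u hu h1
            omega
          · have := hmj u hu h1
            rw [hlo']; omega
    · rw [if_neg (by tauto)]
      refine ⟨pvConn_mono hsub hcv, hnv, ?_⟩
      intro u hu hconn
      rcases (happ u v).1 hconn with h | ⟨h1, h2⟩ | ⟨h1, h2⟩
      · exact hmv u hu h
      · -- v ~ p.2, so comp v = b; and b ≠ hi here, so hi = a, lo = b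
        have hvb : PySem.List.pyGetD comp v 0 = b :=
          (mu_eq_iff ⟨hlen, hv⟩ ⟨h0, hn⟩ hp2).2 (pvConn_symm h2) ▸ rfl
        have hba : ¬ a < b := by
          intro hab2
          exact hvh (by rw [hvb, hhi, if_pos hab2])
        have := hmi u hu h1
        have hvb' : PySem.List.pyGetD comp v 0 = b := hvb
        rw [hvb']
        rw [hlo, hhi] at *
        omega
      · have hva : PySem.List.pyGetD comp v 0 = a :=
          (mu_eq_iff ⟨hlen, hv⟩ ⟨h0, hn⟩ hp1).2 (pvConn_symm h2) ▸ rfl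
        have hab2 : a < b := by
          rcases lt_or_gt_of_ne hab with h | h
          · exact h
          · exact absurd (by rw [hva, hhi, if_neg (by omega)]) hvh
        have := hmj u hu h1
        rw [hva]
        omega

lemma comp_inv {automorphisms : List (List Int)} {num_nodes : Int}
    (hpre : Pre_get_orbits automorphisms num_nodes) (h0 : 0 < num_nodes) :
    pvCompInv (pvPairs automorphisms) num_nodes (pvComp automorphisms num_nodes) := by
  have hbase : pvCompInv [] num_nodes (PySem.List.pyRange 0 num_nodes 1) := by
    constructor
    · rw [PySem.List.length_pyRange_one]; omega
    · intro v hv0 hvn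
      have hlt : v.toNat < (PySem.List.pyRange 0 num_nodes 1).length := by
        rw [PySem.List.length_pyRange_one]; omega
      have hval : PySem.List.pyGetD (PySem.List.pyRange 0 num_nodes 1) v 0 = v := by
        rw [PySem.List.pyGetD_eq_getElem _ 0 hv0
          (by rw [PySem.List.length_pyRange_one]; omega)]
        rw [PySem.List.getElem_pyRange_one 0 num_nodes v.toNat hlt]
        omega
      rw [hval]
      refine ⟨Relation.ReflTransGen.refl, hv0, fun u hu hconn => ?_⟩
      rw [pvConn_nil] at hconn
      omega
  have H : ∀ (ps : List (Int × Int)) (E0 : List (Int × Int)) (comp : List Int),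
      pvCompInv E0 num_nodes comp →
      (∀ p ∈ ps, (0 ≤ p.1 ∧ p.1 < num_nodes) ∧ (0 ≤ p.2 ∧ p.2 < num_nodes)) →
      pvCompInv (E0 ++ ps) num_nodes
        (ps.foldl (fun comp ij => pvUnionEdge num_nodes comp ij) comp) := by
    intro ps
    induction ps with
    | nil => intro E0 comp h _; simpa using h
    | cons p ps ih =>
      intro E0 comp h hb
      have h1 := unionEdge_inv h (hb p List.mem_cons_self)
      have h2 := ih (E0 ++ [p]) _ h1 (fun q hq => hb q (List.mem_cons_of_mem _ hq))
      simpa [List.append_assoc] using h2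
  unfold pvComp
  rw [foldl_rows (fun comp ij => pvUnionEdge num_nodes comp ij) automorphisms
    (PySem.List.pyRange 0 num_nodes 1)]
  have := H (pvPairs automorphisms) [] (PySem.List.pyRange 0 num_nodes 1) hbase
    (pvPairs_bounds hpre h0)
  simpa using this

-- ---------- A-side: the orbit map realises pvStep ----------
lemma orbitMap_fold_mem (ps : List (Int × Int)) :
    ∀ (om : PySem.Dict Int (PySem.Set Int)) (x y : Int),
      (y ∈ PySem.Dict.getD (ps.foldl (fun om ij =>
          PySem.Dict.modify (PySem.Dict.modify om ij.1 PySem.Set.empty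
            (fun s => PySem.Set.add s ij.2)) ij.2 PySem.Set.empty
            (fun s => PySem.Set.add s ij.1)) om) x PySem.Set.empty)
        ↔ y ∈ PySem.Dict.getD om x PySem.Set.empty ∨ (x, y) ∈ ps ∨ (y, x) ∈ ps := by
  induction ps with
  | nil => intro om x y; simp
  | cons p ps ih =>
    intro om x y
    simp only [List.foldl_cons]
    rw [ih]
    have h2 : ∀ z w, (w ∈ PySem.Dict.getD (PySem.Dict.modify (PySem.Dict.modify om p.1
        PySem.Set.empty (fun s => PySem.Set.add s p.2)) p.2 PySem.Set.empty
        (fun s => PySem.Set.add s p.1)) z PySem.Set.empty)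
        ↔ w ∈ PySem.Dict.getD om z PySem.Set.empty ∨ (z = p.1 ∧ w = p.2) ∨ (z = p.2 ∧ w = p.1) := by
      intro z w
      by_cases hz2 : z = p.2
      · subst hz2
        rw [PySem.Dict.getD_modify, if_pos rfl, PySem.Set.mem_add, PySem.Dict.getD_modify]
        by_cases h21 : p.2 = p.1
        · rw [if_pos h21, PySem.Set.mem_add]
          constructor
          · rintro ((h | rfl) | rfl)
            · exact Or.inl (by rw [h21]; exact h)
            · exact Or.inr (Or.inl ⟨h21, rfl⟩)
            · exact Or.inr (Or.inr ⟨rfl, rfl⟩)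
          · rintro (h | ⟨hzp, rfl⟩ | ⟨_, rfl⟩)
            · exact Or.inl (Or.inl (by rw [← h21]; exact h))
            · exact Or.inl (Or.inr rfl)
            · exact Or.inr rfl
        · rw [if_neg h21]
          constructor
          · rintro (h | rfl)
            · exact Or.inl h
            · exact Or.inr (Or.inr ⟨rfl, rfl⟩)
          · rintro (h | ⟨hzp, rfl⟩ | ⟨_, rfl⟩)
            · exact Or.inl h
            · exact absurd hzp h21
            · exact Or.inr rfl
      · rw [PySem.Dict.getD_modify, if_neg hz2, PySem.Dict.getD_modify]
        by_cases hz1 : z = p.1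
        · subst hz1
          rw [if_pos rfl, PySem.Set.mem_add]
          constructor
          · rintro (h | rfl)
            · exact Or.inl h
            · exact Or.inr (Or.inl ⟨rfl, rfl⟩)
          · rintro (h | ⟨_, rfl⟩ | ⟨hzp, rfl⟩)
            · exact Or.inl h
            · exact Or.inr rfl
            · exact absurd hzp hz2
        · rw [if_neg hz1]
          constructor
          · exact fun h => Or.inl h
          · rintro (h | ⟨hzp, rfl⟩ | ⟨hzp, rfl⟩)
            · exact h
            · exact absurd hzp hz1
            · exact absurd hzp hz2
    rw [h2]
    simp only [List.mem_cons, Prod.ext_iff]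
    constructor
    · rintro ((h | ⟨h1, h2⟩ | ⟨h1, h2⟩) | h | h) <;> tauto
    · rintro (h | (⟨h1, h2⟩ | h) | (⟨h1, h2⟩ | h)) <;> tauto

lemma orbitMap_mem (automorphisms : List (List Int)) (x y : Int) :
    y ∈ PySem.Dict.getD (pvOrbitMap automorphisms) x PySem.Set.empty ↔
      pvStep (pvPairs automorphisms) x y := by
  unfold pvOrbitMap
  rw [foldl_rows (fun om ij =>
      PySem.Dict.modify (PySem.Dict.modify om ij.1 PySem.Set.empty
        (fun s => PySem.Set.add s ij.2)) ij.2 PySem.Set.empty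
        (fun s => PySem.Set.add s ij.1)) automorphisms PySem.Dict.empty]
  rw [orbitMap_fold_mem]
  have hempty : PySem.Dict.getD (PySem.Dict.empty : PySem.Dict Int (PySem.Set Int)) x
      PySem.Set.empty = PySem.Set.empty := rfl
  rw [hempty]
  show y ∈ ([] : List Int) ∨ _ ↔ _
  simp [pvStep]

lemma nodup_keys_modify {d : PySem.Dict Int (PySem.Set Int)} (k : Int) (d0 : PySem.Set Int)
    (f : PySem.Set Int → PySem.Set Int) (h : d.keys.Nodup) : (d.modify k d0 f).keys.Nodup := by
  rw [PySem.Dict.keys_modify]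
  exact PySem.Dict.nodup_keys_insert _ _ _ h

lemma orbitMap_nodup_keys (automorphisms : List (List Int)) :
    (pvOrbitMap automorphisms).keys.Nodup := by
  unfold pvOrbitMap
  rw [foldl_rows (fun om ij =>
      PySem.Dict.modify (PySem.Dict.modify om ij.1 PySem.Set.empty
        (fun s => PySem.Set.add s ij.2)) ij.2 PySem.Set.empty
        (fun s => PySem.Set.add s ij.1)) automorphisms PySem.Dict.empty]
  have H : ∀ (ps : List (Int × Int)) (om : PySem.Dict Int (PySem.Set Int)), om.keys.Nodup →
      (ps.foldl (fun om ij =>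
        PySem.Dict.modify (PySem.Dict.modify om ij.1 PySem.Set.empty
          (fun s => PySem.Set.add s ij.2)) ij.2 PySem.Set.empty
          (fun s => PySem.Set.add s ij.1)) om).keys.Nodup := by
    intro ps
    induction ps with
    | nil => exact fun om h => h
    | cons p ps ih =>
      intro om h
      exact ih _ (nodup_keys_modify _ _ _ (nodup_keys_modify _ _ _ h))
  exact H _ _ PySem.Dict.nodup_keys_empty

-- ---------- A-side: the DFS collects exactly the connected component ----------
def pvWeight (om : PySem.Dict Int (PySem.Set Int)) (visited : PySem.Set Int) : Nat :=
  (((PySem.Dict.keys om).filter (fun k => !(PySem.Set.contains visited k))).map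
    (fun k => 1 + (PySem.Dict.getD om k PySem.Set.empty).length)).sum

lemma pvWeight_le (om : PySem.Dict Int (PySem.Set Int)) (visited : PySem.Set Int)
    (hnd : om.keys.Nodup) :
    pvWeight om visited ≤ ((PySem.Dict.items om).map (fun kv => 1 + kv.2.length)).sum := by
  unfold pvWeight
  rw [PySem.Dict.items_eq_map_keys om hnd PySem.Set.empty, List.map_map]
  apply List.Sublist.sum_le_sum
  · exact List.Sublist.map _ List.filter_sublist
  · exact fun a _ => Nat.zero_le _

lemma sum_filter_erase {l : List Int} (hnd : l.Nodup) {c : Int} (hc : c ∈ l)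
    (p q : Int → Bool) (hpq : ∀ k, q k = (p k && !(k == c))) (hpc : p c = true)
    (f : Int → Nat) :
    ((l.filter q).map f).sum + f c = ((l.filter p).map f).sum := by
  induction l with
  | nil => cases hc
  | cons x l ih =>
    by_cases hxc : c = x
    · subst hxc
      have hxl : c ∉ l := (List.nodup_cons.1 hnd).1
      have hq : List.filter q l = List.filter p l := by
        apply List.filter_congr
        intro k hk
        have hkc : (k == c) = false := by
          simp only [beq_eq_false_iff_ne, ne_eq]
          exact fun h => hxl (h ▸ hk)
        simp [hpq k, hkc]
      have hqx : q c = false := by simp [hpq c]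
      simp only [List.filter_cons, hqx, hpc, Bool.false_eq_true, ite_false, ite_true, hq,
        List.map_cons, List.sum_cons]
      omega
    · have hcl : c ∈ l := by
        rcases List.mem_cons.1 hc with h | h
        · exact absurd h hxc
        · exact h
      have hqx : q x = p x := by
        have : (x == c) = false := by
          simp only [beq_eq_false_iff_ne, ne_eq]
          exact fun h => hxc h.symm
        simp [hpq x, this]
      have := ih (List.nodup_cons.1 hnd).2 hcl
      cases hpx : p x <;>
        simp only [List.filter_cons, hqx, hpx, Bool.false_eq_true, ite_false, ite_true,
          List.map_cons, List.sum_cons] <;> omega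

lemma pvWeight_add_mem {om : PySem.Dict Int (PySem.Set Int)} {visited : PySem.Set Int} {c : Int}
    (hnd : om.keys.Nodup) (hc : c ∈ om.keys) (hv : c ∉ visited) :
    pvWeight om (PySem.Set.add visited c) + (1 + (PySem.Dict.getD om c PySem.Set.empty).length)
      = pvWeight om visited := by
  unfold pvWeight
  apply sum_filter_erase hnd hc
  · intro k
    rw [Bool.eq_iff_iff]
    simp only [Bool.and_eq_true, Bool.not_eq_true', Bool.eq_false_iff, ne_eq,
      PySem.Set.contains_iff, PySem.Set.mem_add, beq_iff_eq]
    tauto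
  · simp only [Bool.not_eq_true', Bool.eq_false_iff, ne_eq, PySem.Set.contains_iff]
    exact hv

lemma pvWeight_add_not_mem {om : PySem.Dict Int (PySem.Set Int)} {visited : PySem.Set Int} {c : Int}
    (hc : c ∉ om.keys) :
    pvWeight om (PySem.Set.add visited c) = pvWeight om visited := by
  unfold pvWeight
  congr 2
  apply List.filter_congr
  intro k hk
  have hkc : k ≠ c := fun h => hc (h ▸ hk)
  rw [Bool.eq_iff_iff]
  simp only [Bool.not_eq_true', Bool.eq_false_iff, ne_eq, PySem.Set.contains_iff,
    PySem.Set.mem_add]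
  tauto

lemma conn_escape {E : List (Int × Int)} {visited : PySem.Set Int} {S : List Int}
    (hinv : ∀ v ∈ visited, ∀ w, pvStep E v w → w ∈ visited ∨ w ∈ S) :
    ∀ u x, u ∈ visited → pvConn E u x → x ∈ visited ∨ ∃ t ∈ S, pvConn E t x := by
  intro u x hu h
  induction h using Relation.ReflTransGen.head_induction_on with
  | refl => exact Or.inl hu
  | head hs hrest ih =>
    rcases hinv _ hu _ hs with hw | hw
    · exact ih hw
    · exact Or.inr ⟨_, hw, hrest⟩

lemma pvDfs_spec {om : PySem.Dict Int (PySem.Set Int)} {E : List (Int × Int)}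
    (hom : ∀ x y, (y ∈ PySem.Dict.getD om x PySem.Set.empty) ↔ pvStep E x y)
    (hnd : om.keys.Nodup) :
    ∀ (fuel : Nat) (stack : List Int) (visited orbit : PySem.Set Int),
      stack.length + pvWeight om visited + 1 ≤ fuel →
      (∀ v ∈ visited, ∀ w, pvStep E v w → w ∈ visited ∨ w ∈ stack) →
      (∀ x, x ∈ (pvDfs om fuel stack visited orbit).1 ↔ x ∈ visited ∨ ∃ t ∈ stack, pvConn E t x) ∧
      (∀ x, x ∈ (pvDfs om fuel stack visited orbit).2 ↔
          x ∈ orbit ∨ (x ∉ visited ∧ ∃ t ∈ stack, pvConn E t x)) := by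
  intro fuel
  induction fuel with
  | zero => intro stack visited orbit hfuel _; omega
  | succ f ih =>
    intro stack visited orbit hfuel hinv
    rcases hst : stack.getLast? with _ | current
    · -- empty stack
      have hnil : stack = [] := List.getLast?_eq_none_iff.1 hst
      subst hnil
      simp only [pvDfs, List.getLast?_nil]
      constructor
      · intro x; simp
      · intro x; simp
    · obtain ⟨ys, rfl⟩ := List.getLast?_eq_some_iff.1 hst
      simp only [pvDfs, List.getLast?_concat, List.dropLast_concat]
      by_cases hvis : PySem.Set.contains visited current = true
      · rw [if_pos hvis]
        have hcv : current ∈ visited := (PySem.Set.contains_iff _ _).1 hvis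
        have hinv' : ∀ v ∈ visited, ∀ w, pvStep E v w → w ∈ visited ∨ w ∈ ys := by
          intro v hvv w hs
          rcases hinv v hvv w hs with h | h
          · exact Or.inl h
          · rcases List.mem_append.1 h with h | h
            · exact Or.inr h
            · rw [List.mem_singleton] at h
              exact Or.inl (h ▸ hcv)
        have hesc := conn_escape hinv'
        obtain ⟨ih1, ih2⟩ := ih ys visited orbit (by simp only [List.length_append, List.length_cons, List.length_nil] at hfuel; omega) hinv'
        constructor
        · intro x
          rw [ih1 x]
          constructor
          · rintro (h | ⟨t, ht, hc⟩)
            · exact Or.inl h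
            · exact Or.inr ⟨t, List.mem_append_left _ ht, hc⟩
          · rintro (h | ⟨t, ht, hc⟩)
            · exact Or.inl h
            · rcases List.mem_append.1 ht with ht | ht
              · exact Or.inr ⟨t, ht, hc⟩
              · rw [List.mem_singleton] at ht
                subst ht
                rcases hesc t x hcv hc with h | ⟨u, hu, hc'⟩
                · exact Or.inl h
                · exact Or.inr ⟨u, hu, hc'⟩
        · intro x
          rw [ih2 x]
          constructor
          · rintro (h | ⟨hxv, t, ht, hc⟩)
            · exact Or.inl h
            · exact Or.inr ⟨hxv, t, List.mem_append_left _ ht, hc⟩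
          · rintro (h | ⟨hxv, t, ht, hc⟩)
            · exact Or.inl h
            · rcases List.mem_append.1 ht with ht | ht
              · exact Or.inr ⟨hxv, t, ht, hc⟩
              · rw [List.mem_singleton] at ht
                subst ht
                rcases hesc t x hcv hc with h | ⟨u, hu, hc'⟩
                · exact absurd h hxv
                · exact Or.inr ⟨hxv, u, hu, hc'⟩
      · rw [if_neg hvis]
        have hcv : current ∉ visited := fun h => hvis ((PySem.Set.contains_iff _ _).2 h)
        have hfuel' : (ys ++ PySem.Dict.getD om current PySem.Set.empty).length
            + pvWeight om (PySem.Set.add visited current) + 1 ≤ f := by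
          by_cases hmem : current ∈ om.keys
          · have := pvWeight_add_mem hnd hmem hcv
            simp only [List.length_append] at *
            omega
          · have h1 := pvWeight_add_not_mem (visited := visited) hmem
            have h2 : PySem.Dict.getD om current PySem.Set.empty = PySem.Set.empty := by
              apply PySem.Dict.getD_of_not_contains
              rw [← Bool.not_eq_true, PySem.Dict.contains_iff_mem_keys]
              exact hmem
            rw [h2, h1]
            simp only [List.length_append, List.length_cons, List.length_nil,
              PySem.Set.empty] at *
            omega
        have hinv' : ∀ v ∈ PySem.Set.add visited current, ∀ w, pvStep E v w →
            w ∈ PySem.Set.add visited current ∨ w ∈ ys ++ PySem.Dict.getD om current PySem.Set.empty := by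
          intro v hvv w hs
          rcases (PySem.Set.mem_add _ _ _).1 hvv with hvv | rfl
          · rcases hinv v hvv w hs with h | h
            · exact Or.inl ((PySem.Set.mem_add _ _ _).2 (Or.inl h))
            · rcases List.mem_append.1 h with h | h
              · exact Or.inr (List.mem_append_left _ h)
              · rw [List.mem_singleton] at h
                exact Or.inl ((PySem.Set.mem_add _ _ _).2 (Or.inr h))
          · exact Or.inr (List.mem_append_right _ ((hom v w).2 hs))
        obtain ⟨ih1, ih2⟩ := ih _ _ _ hfuel' hinv'
        have hkey : ∀ x, (x ∈ PySem.Set.add visited current ∨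
            (∃ t ∈ ys ++ PySem.Dict.getD om current PySem.Set.empty, pvConn E t x)) ↔
            (x ∈ visited ∨ ∃ t ∈ ys ++ [current], pvConn E t x) := by
          intro x
          constructor
          · rintro (h | ⟨t, ht, hc⟩)
            · rcases (PySem.Set.mem_add _ _ _).1 h with h | rfl
              · exact Or.inl h
              · exact Or.inr ⟨x, List.mem_append_right _ (List.mem_singleton_self _),
                  Relation.ReflTransGen.refl⟩
            · rcases List.mem_append.1 ht with ht | ht
              · exact Or.inr ⟨t, List.mem_append_left _ ht, hc⟩
              · exact Or.inr ⟨current, List.mem_append_right _ (List.mem_singleton_self _),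
                  (Relation.ReflTransGen.single ((hom current t).1 ht)).trans hc⟩
          · rintro (h | ⟨t, ht, hc⟩)
            · exact Or.inl ((PySem.Set.mem_add _ _ _).2 (Or.inl h))
            · rcases List.mem_append.1 ht with ht | ht
              · exact Or.inr ⟨t, List.mem_append_left _ ht, hc⟩
              · rw [List.mem_singleton] at ht
                subst ht
                rcases hc.cases_head with rfl | ⟨w, hs, hc'⟩
                · exact Or.inl ((PySem.Set.mem_add _ _ _).2 (Or.inr rfl))
                · exact Or.inr ⟨w, List.mem_append_right _ ((hom t w).2 hs), hc'⟩
        constructor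
        · intro x
          rw [ih1 x, hkey x]
        · intro x
          rw [ih2 x]
          constructor
          · rintro (h | ⟨hxv, t, ht, hc⟩)
            · rcases (PySem.Set.mem_add _ _ _).1 h with h | rfl
              · exact Or.inl h
              · exact Or.inr ⟨hcv, x, List.mem_append_right _ (List.mem_singleton_self _),
                  Relation.ReflTransGen.refl⟩
            · have hxv' : x ∉ visited := fun h => hxv ((PySem.Set.mem_add _ _ _).2 (Or.inl h))
              rcases List.mem_append.1 ht with ht | ht
              · exact Or.inr ⟨hxv', t, List.mem_append_left _ ht, hc⟩
              · exact Or.inr ⟨hxv', current, List.mem_append_right _ (List.mem_singleton_self _),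
                  (Relation.ReflTransGen.single ((hom current t).1 ht)).trans hc⟩
          · rintro (h | ⟨hxv, t, ht, hc⟩)
            · exact Or.inl ((PySem.Set.mem_add _ _ _).2 (Or.inl h))
            · by_cases hxc : x = current
              · exact Or.inl ((PySem.Set.mem_add _ _ _).2 (Or.inr hxc))
              · have hxv' : x ∉ PySem.Set.add visited current := by
                  intro h
                  rcases (PySem.Set.mem_add _ _ _).1 h with h | h
                  · exact hxv h
                  · exact hxc h
                rcases List.mem_append.1 ht with ht | ht
                · exact Or.inr ⟨hxv', t, List.mem_append_left _ ht, hc⟩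
                · rw [List.mem_singleton] at ht
                  subst ht
                  rcases hc.cases_head with rfl | ⟨w, hs, hc'⟩
                  · exact absurd rfl hxc
                  · exact Or.inr ⟨hxv', w, List.mem_append_right _ ((hom t w).2 hs), hc'⟩

-- ---------- helpers about dedup ----------
lemma dedup_concat {l : List Int} {a : Int} :
    PySem.List.dedup (l ++ [a]) = if a ∈ l then PySem.List.dedup l else PySem.List.dedup l ++ [a] := by
  simp only [PySem.List.dedup_eq_ofList, PySem.Set.ofList_eq_foldl, List.foldl_append,
    List.foldl_cons, List.foldl_nil]
  have : List.foldl PySem.Set.add [] l = PySem.Set.ofList l := (PySem.Set.ofList_eq_foldl l).symm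
  rw [this]
  show PySem.Set.add (PySem.Set.ofList l) a = _
  unfold PySem.Set.add
  by_cases h : a ∈ l
  · rw [if_pos ((PySem.Set.contains_iff _ _).2 ((PySem.Set.mem_ofList _ _).2 h)), if_pos h]
  · rw [if_neg (by
      intro hc
      exact h ((PySem.Set.mem_ofList _ _).1 ((PySem.Set.contains_iff _ _).1 hc))), if_neg h]

lemma foldl_add_append (q : List Int) : ∀ s : PySem.Set Int, ∃ t, q.foldl PySem.Set.add s = s ++ t := by
  induction q with
  | nil => exact fun s => ⟨[], by simp⟩
  | cons x q ih =>
    intro s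
    obtain ⟨t, ht⟩ := ih (PySem.Set.add s x)
    simp only [List.foldl_cons, ht]
    unfold PySem.Set.add
    by_cases h : s.contains x = true
    · rw [if_pos h]; exact ⟨t, rfl⟩
    · rw [if_neg h]; exact ⟨[x] ++ t, by simp⟩

lemma dedup_append_prefix (p q : List Int) :
    ∃ t, PySem.List.dedup (p ++ q) = PySem.List.dedup p ++ t := by
  simp only [PySem.List.dedup_eq_ofList, PySem.Set.ofList_eq_foldl, List.foldl_append]
  exact foldl_add_append q _

lemma dedup_idxOf_prefix {p : List Int} (q : List Int) {c : Int} (hc : c ∈ p) :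
    (PySem.List.dedup (p ++ q)).idxOf c = (PySem.List.dedup p).idxOf c := by
  obtain ⟨t, ht⟩ := dedup_append_prefix p q
  rw [ht, List.idxOf_append, if_pos ((PySem.List.mem_dedup _ _).2 hc)]

lemma forall2_append {α β : Type} {R : α → β → Prop} {a c : List α} {b d : List β}
    (h1 : List.Forall₂ R a b) (h2 : List.Forall₂ R c d) : List.Forall₂ R (a ++ c) (b ++ d) := by
  induction h1 with
  | nil => exact h2
  | cons h t ih => exact List.Forall₂.cons h ih

-- ---------- A-side: the scan loop ----------
lemma pvScan_inv {automorphisms : List (List Int)} {n : Int}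
    (hpre : Pre_get_orbits automorphisms n) (h0 : 0 < n) :
    ∀ m : Nat, (m : Int) ≤ n →
      (∀ x : Int, x ∈ ((PySem.List.pyRange 0 (m : Int) 1).foldl (fun st node =>
          if PySem.Set.contains st.1 node then st
          else
            let r := pvDfs (pvOrbitMap automorphisms) (pvFuel (pvOrbitMap automorphisms)) [node] st.1 PySem.Set.empty
            (r.1, st.2 ++ [r.2]))
          ((PySem.Set.empty : PySem.Set Int), ([] : List (PySem.Set Int)))).1 ↔
        0 ≤ x ∧ x < n ∧ PySem.List.pyGetD (pvComp automorphisms n) x 0 < (m : Int)) ∧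
      List.Forall₂ (fun (o : PySem.Set Int) (r : Int) => ∀ x : Int,
          x ∈ o ↔ 0 ≤ x ∧ x < n ∧ PySem.List.pyGetD (pvComp automorphisms n) x 0 = r)
        ((PySem.List.pyRange 0 (m : Int) 1).foldl (fun st node =>
          if PySem.Set.contains st.1 node then st
          else
            let r := pvDfs (pvOrbitMap automorphisms) (pvFuel (pvOrbitMap automorphisms)) [node] st.1 PySem.Set.empty
            (r.1, st.2 ++ [r.2]))
          ((PySem.Set.empty : PySem.Set Int), ([] : List (PySem.Set Int)))).2
        (PySem.List.dedup ((pvComp automorphisms n).take m)) := by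
  have hinv := comp_inv hpre h0
  have hEb := pvPairs_bounds hpre h0
  have hom := orbitMap_mem automorphisms
  have hnd := orbitMap_nodup_keys automorphisms
  have hlenμ : (pvComp automorphisms n).length = n.toNat := hinv.1
  intro m
  induction m with
  | zero =>
    intro _
    rw [Int.natCast_zero, PySem.List.pyRange_one_eq_nil le_rfl]
    simp only [List.foldl_nil, List.take_zero]
    constructor
    · intro x
      show x ∈ ([] : List Int) ↔ _
      simp only [List.not_mem_nil, false_iff, not_and]
      intro hx0 hxn
      have := (hinv.2 x hx0 hxn).2.1
      omega
    · show List.Forall₂ _ [] (PySem.List.dedup [])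
      show List.Forall₂ _ [] (PySem.Set.ofList [])
      exact List.Forall₂.nil
  | succ m ih =>
    intro hm1
    have hm : (m : Int) ≤ n := by push_cast at hm1; omega
    have hmn : (m : Int) < n := by push_cast at hm1; omega
    have hm0 : (0 : Int) ≤ (m : Int) := by positivity
    obtain ⟨ih1, ih2⟩ := ih hm
    have hcast : ((m + 1 : Nat) : Int) = (m : Int) + 1 := by push_cast; ring
    rw [hcast, PySem.List.pyRange_one_succ_right hm0, List.foldl_append, List.foldl_cons,
      List.foldl_nil]
    have hmlt : m < (pvComp automorphisms n).length := by
      rw [hlenμ]; omega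
    have hgm : PySem.List.pyGetD (pvComp automorphisms n) (m : Int) 0
        = (pvComp automorphisms n)[m] := by
      rw [PySem.List.pyGetD_eq_getElem _ 0 hm0 (by rw [hlenμ]; omega)]
      simp
    have htake : (pvComp automorphisms n).take (m + 1)
        = (pvComp automorphisms n).take m ++ [(pvComp automorphisms n)[m]] := by
      rw [List.take_add_one, List.getElem?_eq_getElem hmlt]
      rfl
    have hmu_le : PySem.List.pyGetD (pvComp automorphisms n) (m : Int) 0 ≤ (m : Int) :=
      mu_le_self hinv ⟨hm0, hmn⟩
    by_cases hlt : PySem.List.pyGetD (pvComp automorphisms n) (m : Int) 0 < (m : Int)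
    · rw [if_pos ((PySem.Set.contains_iff _ _).2 ((ih1 (m : Int)).2 ⟨hm0, hmn, hlt⟩))]
      have hmem : (pvComp automorphisms n)[m] ∈ (pvComp automorphisms n).take m := by
        have hk0 : 0 ≤ PySem.List.pyGetD (pvComp automorphisms n) (m : Int) 0 :=
          (hinv.2 (m : Int) hm0 hmn).2.1
        have hklt : (PySem.List.pyGetD (pvComp automorphisms n) (m : Int) 0).toNat < m := by
          omega
        refine List.mem_iff_getElem.2
          ⟨(PySem.List.pyGetD (pvComp automorphisms n) (m : Int) 0).toNat, ?_, ?_⟩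
        · rw [List.length_take]; omega
        · rw [List.getElem_take]
          rw [← hgm]
          have hcast2 : (((PySem.List.pyGetD (pvComp automorphisms n) (m : Int) 0).toNat : Nat) : Int)
              = PySem.List.pyGetD (pvComp automorphisms n) (m : Int) 0 := Int.toNat_of_nonneg hk0
          rw [← PySem.List.pyGetD_eq_getElem _ 0 (by omega) (by rw [hlenμ]; omega)]
          exact mu_fixed hinv ⟨hm0, hmn⟩
      constructor
      · intro x
        rw [ih1 x]
        constructor
        · rintro ⟨h1, h2, h3⟩
          exact ⟨h1, h2, by omega⟩
        · rintro ⟨h1, h2, h3⟩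
          refine ⟨h1, h2, ?_⟩
          by_contra hge
          have heq : PySem.List.pyGetD (pvComp automorphisms n) x 0 = (m : Int) := by omega
          have := mu_fixed hinv ⟨h1, h2⟩
          rw [heq] at this
          omega
      · rw [htake, dedup_concat, if_pos hmem]
        exact ih2
    · have heqm : PySem.List.pyGetD (pvComp automorphisms n) (m : Int) 0 = (m : Int) := by omega
      rw [if_neg (fun h => hlt (((ih1 (m : Int)).1 ((PySem.Set.contains_iff _ _).1 h)).2.2))]
      have hscani : ∀ v ∈ ((PySem.List.pyRange 0 (m : Int) 1).foldl (fun st node =>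
          if PySem.Set.contains st.1 node then st
          else
            let r := pvDfs (pvOrbitMap automorphisms) (pvFuel (pvOrbitMap automorphisms)) [node] st.1 PySem.Set.empty
            (r.1, st.2 ++ [r.2]))
          ((PySem.Set.empty : PySem.Set Int), ([] : List (PySem.Set Int)))).1, ∀ w,
          pvStep (pvPairs automorphisms) v w → w ∈ ((PySem.List.pyRange 0 (m : Int) 1).foldl (fun st node =>
          if PySem.Set.contains st.1 node then st
          else
            let r := pvDfs (pvOrbitMap automorphisms) (pvFuel (pvOrbitMap automorphisms)) [node] st.1 PySem.Set.empty
            (r.1, st.2 ++ [r.2]))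
          ((PySem.Set.empty : PySem.Set Int), ([] : List (PySem.Set Int)))).1 ∨ w ∈ [(m : Int)] := by
        intro v hv w hs
        obtain ⟨hv0, hvn, hvlt⟩ := (ih1 v).1 hv
        have hconn : pvConn (pvPairs automorphisms) w v := Relation.ReflTransGen.single hs.symm
        have hwb : 0 ≤ w ∧ w < n :=
          pvConn_bounds (u := v) hEb (Relation.ReflTransGen.single hs) ⟨hv0, hvn⟩
        have : PySem.List.pyGetD (pvComp automorphisms n) w 0
            = PySem.List.pyGetD (pvComp automorphisms n) v 0 :=
          (mu_eq_iff hinv hwb ⟨hv0, hvn⟩).2 hconn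
        exact Or.inl ((ih1 w).2 ⟨hwb.1, hwb.2, by omega⟩)
      have hfuel : (1 : Nat) + pvWeight (pvOrbitMap automorphisms) ((PySem.List.pyRange 0 (m : Int) 1).foldl (fun st node =>
          if PySem.Set.contains st.1 node then st
          else
            let r := pvDfs (pvOrbitMap automorphisms) (pvFuel (pvOrbitMap automorphisms)) [node] st.1 PySem.Set.empty
            (r.1, st.2 ++ [r.2]))
          ((PySem.Set.empty : PySem.Set Int), ([] : List (PySem.Set Int)))).1 + 1
          ≤ pvFuel (pvOrbitMap automorphisms) := by
        have := pvWeight_le (pvOrbitMap automorphisms) ((PySem.List.pyRange 0 (m : Int) 1).foldl (fun st node =>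
          if PySem.Set.contains st.1 node then st
          else
            let r := pvDfs (pvOrbitMap automorphisms) (pvFuel (pvOrbitMap automorphisms)) [node] st.1 PySem.Set.empty
            (r.1, st.2 ++ [r.2]))
          ((PySem.Set.empty : PySem.Set Int), ([] : List (PySem.Set Int)))).1 hnd
        have h3 : pvFuel (pvOrbitMap automorphisms)
            = 2 + ((PySem.Dict.items (pvOrbitMap automorphisms)).map (fun kv => 1 + kv.2.length)).sum := rfl
        omega
      obtain ⟨spec1, spec2⟩ := pvDfs_spec hom hnd (pvFuel (pvOrbitMap automorphisms))
        [(m : Int)] _ PySem.Set.empty (by simpa using hfuel) hscani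
      have hconn_iff : ∀ x : Int, pvConn (pvPairs automorphisms) (m : Int) x ↔
          (0 ≤ x ∧ x < n ∧ PySem.List.pyGetD (pvComp automorphisms n) x 0 = (m : Int)) := by
        intro x
        constructor
        · intro h
          have hxb : 0 ≤ x ∧ x < n := pvConn_bounds hEb h ⟨hm0, hmn⟩
          have := (mu_eq_iff hinv hxb ⟨hm0, hmn⟩).2 (pvConn_symm h)
          exact ⟨hxb.1, hxb.2, by omega⟩
        · rintro ⟨h1, h2, h3⟩
          have := (hinv.2 x h1 h2).1
          rw [h3] at this
          exact this
      constructor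
      · intro x
        rw [spec1 x]
        simp only [List.mem_singleton, exists_eq_left]
        rw [ih1 x]
        constructor
        · rintro (⟨h1, h2, h3⟩ | hc)
          · exact ⟨h1, h2, by omega⟩
          · obtain ⟨h1, h2, h3⟩ := (hconn_iff x).1 hc
            exact ⟨h1, h2, by omega⟩
        · rintro ⟨h1, h2, h3⟩
          by_cases hx : PySem.List.pyGetD (pvComp automorphisms n) x 0 < (m : Int)
          · exact Or.inl ⟨h1, h2, hx⟩
          · have : PySem.List.pyGetD (pvComp automorphisms n) x 0 = (m : Int) := by omega
            exact Or.inr ((hconn_iff x).2 ⟨h1, h2, this⟩)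
      · rw [htake, dedup_concat, if_neg ?hnotmem]
        case hnotmem =>
          intro hmem
          obtain ⟨k, hk, hkeq⟩ := List.mem_iff_getElem.1 hmem
          rw [List.length_take] at hk
          rw [List.getElem_take] at hkeq
          have hkm : k < m := by omega
          have hkv : (pvComp automorphisms n)[k] = PySem.List.pyGetD (pvComp automorphisms n) (k : Int) 0 := by
            rw [PySem.List.pyGetD_eq_getElem _ 0 (by positivity) (by rw [hlenμ]; omega)]
            simp
          have hle : PySem.List.pyGetD (pvComp automorphisms n) (k : Int) 0 ≤ (k : Int) :=
            mu_le_self hinv ⟨by positivity, by rw [hlenμ] at hk; omega⟩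
          rw [hkv] at hkeq
          rw [← hgm] at hkeq
          rw [heqm] at hkeq
          have : ((k : Nat) : Int) < (m : Int) := by exact_mod_cast hkm
          omega
        apply forall2_append ih2
        refine List.forall₂_cons.2 ⟨?_, List.Forall₂.nil⟩
        intro x
        rw [spec2 x]
        simp only [List.mem_singleton, exists_eq_left]
        constructor
        · rintro (h | ⟨hnv, hc⟩)
          · exact absurd h (List.not_mem_nil)
          · rw [← hgm, heqm]
            exact (hconn_iff x).1 hc
        · intro hx
          rw [← hgm, heqm] at hx
          refine Or.inr ⟨?_, (hconn_iff x).2 hx⟩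
          intro hmem
          have := ((ih1 x).1 hmem).2.2
          omega

-- ---------- A-side: writing the orbit indices ----------
lemma write_orbit (idx : Int) :
    ∀ (l : List Int) (R : List Int), (∀ x ∈ l, 0 ≤ x ∧ x < (R.length : Int)) →
    (l.foldl (fun oi node => PySem.List.pySetD oi node idx) R).length = R.length ∧
    ∀ v : Int, 0 ≤ v →
      PySem.List.pyGetD (l.foldl (fun oi node => PySem.List.pySetD oi node idx) R) v 0
        = if v ∈ l then idx else PySem.List.pyGetD R v 0 := by
  intro l
  induction l with
  | nil => exact fun R _ => ⟨rfl, fun v _ => by simp⟩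
  | cons x l ih =>
    intro R hb
    obtain ⟨hx0, hxlen⟩ := hb x List.mem_cons_self
    have hxcast : ((x.toNat : Nat) : Int) = x := Int.toNat_of_nonneg hx0
    have hxlt : x.toNat < R.length := by omega
    have hlen1 : (PySem.List.pySetD R x idx).length = R.length := PySem.List.length_pySetD R x idx
    have hb' : ∀ y ∈ l, 0 ≤ y ∧ y < ((PySem.List.pySetD R x idx).length : Int) := by
      rw [hlen1]; exact fun y hy => hb y (List.mem_cons_of_mem _ hy)
    obtain ⟨ihl, ihg⟩ := ih (PySem.List.pySetD R x idx) hb'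
    constructor
    · simp only [List.foldl_cons]
      rw [ihl, hlen1]
    · intro v hv
      simp only [List.foldl_cons]
      rw [ihg v hv]
      by_cases hvl : v ∈ l
      · rw [if_pos hvl, if_pos (List.mem_cons_of_mem _ hvl)]
      · rw [if_neg hvl]
        by_cases hvx : v = x
        · subst hvx
          rw [if_pos List.mem_cons_self]
          rw [← hxcast, PySem.List.pyGetD_pySetD_natCast R v.toNat v.toNat idx 0 hxlt,
            if_pos rfl]
        · rw [if_neg (by simp [hvx, hvl])]
          by_cases hvlen : v < (R.length : Int)
          · have hvn : ((v.toNat : Nat) : Int) = v := Int.toNat_of_nonneg hv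
            rw [← hxcast, ← hvn, PySem.List.pyGetD_pySetD_natCast R x.toNat v.toNat idx 0 hxlt,
              if_neg (by omega)]
          · rw [PySem.List.pyGetD_of_nonneg _ _ hv, PySem.List.pyGetD_of_nonneg _ _ hv]
            have h1 : R.length ≤ v.toNat := by omega
            rw [List.getD_eq_getElem?_getD, List.getD_eq_getElem?_getD]
            rw [List.getElem?_eq_none (by rw [hlen1]; omega), List.getElem?_eq_none h1]

lemma write_phase {n : Int} {μ : List Int} :
    ∀ (os : List (PySem.Set Int)) (rs : List Int) (s : Int) (R : List Int),
      R.length = n.toNat → rs.Nodup →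
      List.Forall₂ (fun (o : PySem.Set Int) (r : Int) => ∀ x : Int,
          x ∈ o ↔ 0 ≤ x ∧ x < n ∧ PySem.List.pyGetD μ x 0 = r) os rs →
      ((PySem.List.enumerate os s).foldl (fun oi io =>
          io.2.foldl (fun oi node => PySem.List.pySetD oi node io.1) oi) R).length = R.length ∧
      ∀ v : Int, 0 ≤ v → v < n →
        PySem.List.pyGetD ((PySem.List.enumerate os s).foldl (fun oi io =>
            io.2.foldl (fun oi node => PySem.List.pySetD oi node io.1) oi) R) v 0
          = if PySem.List.pyGetD μ v 0 ∈ rs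
            then s + ((rs.idxOf (PySem.List.pyGetD μ v 0) : Nat) : Int)
            else PySem.List.pyGetD R v 0 := by
  intro os
  induction os with
  | nil =>
    intro rs s R hR hnd hf
    cases hf
    exact ⟨rfl, fun v _ _ => by simp⟩
  | cons o os ihos =>
    intro rs s R hR hnd hf
    rcases hf with _ | ⟨ho, hf'⟩
    rename_i r rs'
    have hnd' : rs'.Nodup := (List.nodup_cons.1 hnd).2
    have hrns : r ∉ rs' := (List.nodup_cons.1 hnd).1
    have hob : ∀ x ∈ o, 0 ≤ x ∧ x < (R.length : Int) := by
      intro x hx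
      obtain ⟨h1, h2, _⟩ := (ho x).1 hx
      rw [hR]
      omega
    obtain ⟨hwlen, hwval⟩ := write_orbit s o R hob
    have hR1 : (o.foldl (fun oi node => PySem.List.pySetD oi node s) R).length = n.toNat := by
      rw [hwlen, hR]
    obtain ⟨ihlen, ihval⟩ := ihos rs' (s + 1) _ hR1 hnd' hf'
    rw [PySem.List.enumerate_cons]
    constructor
    · simp only [List.foldl_cons]
      rw [ihlen, hwlen]
    · intro v hv0 hvn
      simp only [List.foldl_cons]
      rw [ihval v hv0 hvn]
      have hval1 := hwval v hv0
      have hmemo : v ∈ o ↔ PySem.List.pyGetD μ v 0 = r := by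
        rw [ho v]
        constructor
        · rintro ⟨_, _, h⟩; exact h
        · intro h; exact ⟨hv0, hvn, h⟩
      by_cases hvr : PySem.List.pyGetD μ v 0 = r
      · rw [if_neg (hvr ▸ hrns), hval1, if_pos (hmemo.2 hvr),
          if_pos (by rw [hvr]; exact List.mem_cons_self), hvr, List.idxOf_cons_self]
        simp
      · by_cases hvin : PySem.List.pyGetD μ v 0 ∈ rs'
        · rw [if_pos hvin, if_pos (List.mem_cons_of_mem _ hvin)]
          rw [List.idxOf_cons_ne _ (fun h => hvr h.symm)]
          push_cast
          ring
        · rw [if_neg hvin, if_neg (by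
            intro h
            rcases List.mem_cons.1 h with h | h
            · exact hvr h
            · exact hvin h), hval1, if_neg (fun h => hvr (hmemo.1 h))]

-- ---------- the common closed form ----------
def pvOut (automorphisms : List (List Int)) (num_nodes : Int) : List Int :=
  (pvComp automorphisms num_nodes).map
    (fun c => (((PySem.List.dedup (pvComp automorphisms num_nodes)).idxOf c : Nat) : Int))

lemma get_orbits_eq {automorphisms : List (List Int)} {num_nodes : Int}
    (hpre : Pre_get_orbits automorphisms num_nodes) (h0 : 0 < num_nodes) :
    get_orbits automorphisms num_nodes = pvOut automorphisms num_nodes := by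
  have hinv := comp_inv hpre h0
  have hlenμ : (pvComp automorphisms num_nodes).length = num_nodes.toNat := hinv.1
  have hncast : ((num_nodes.toNat : Nat) : Int) = num_nodes := Int.toNat_of_nonneg (by omega)
  obtain ⟨ih1, ih2⟩ := pvScan_inv hpre h0 num_nodes.toNat (by omega)
  have htake_eq : List.take num_nodes.toNat (pvComp automorphisms num_nodes)
      = pvComp automorphisms num_nodes := by
    rw [← hlenμ, List.take_length]
  rw [htake_eq, hncast] at ih2
  unfold get_orbits pvScan
  dsimp only
  rw [PySem.List.pyRepeat_singleton]
  obtain ⟨hwlen, hwval⟩ := write_phase _ (PySem.List.dedup (pvComp automorphisms num_nodes)) 0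
    (List.replicate num_nodes.toNat (-1)) (by rw [List.length_replicate])
    (PySem.List.nodup_dedup _) ih2
  have hmem : ∀ v : Int, 0 ≤ v → v < num_nodes →
      PySem.List.pyGetD (pvComp automorphisms num_nodes) v 0
        ∈ PySem.List.dedup (pvComp automorphisms num_nodes) := by
    intro v hv0 hvn
    rw [PySem.List.mem_dedup]
    have hb := (hinv.2 v hv0 hvn).2.1
    have hlt := mu_le_self hinv ⟨hv0, hvn⟩
    refine List.mem_iff_getElem.2
      ⟨(PySem.List.pyGetD (pvComp automorphisms num_nodes) v 0).toNat, by rw [hlenμ]; omega, ?_⟩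
    rw [← PySem.List.pyGetD_eq_getElem _ 0 (by omega) (by rw [hlenμ]; omega)]
    exact mu_fixed hinv ⟨hv0, hvn⟩
  apply List.ext_getElem
  · rw [hwlen, List.length_replicate]
    unfold pvOut
    rw [List.length_map, hlenμ]
  · intro k hk1 hk2
    rw [hwlen, List.length_replicate] at hk1
    have hkb : (0 : Int) ≤ (k : Int) ∧ (k : Int) < num_nodes := ⟨by positivity, by omega⟩
    have hkv := hwval (k : Int) hkb.1 hkb.2
    rw [if_pos (hmem _ hkb.1 hkb.2)] at hkv
    rw [PySem.List.pyGetD_natCast] at hkv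
    rw [List.getD_eq_getElem _ _ (by rw [hwlen, List.length_replicate]; omega)] at hkv
    rw [hkv]
    unfold pvOut
    rw [List.getElem_map]
    have hμk : PySem.List.pyGetD (pvComp automorphisms num_nodes) ((k : Nat) : Int) 0
        = (pvComp automorphisms num_nodes)[k] := by
      rw [PySem.List.pyGetD_natCast, List.getD_eq_getElem _ _ (by rw [hlenμ]; omega)]
    rw [hμk, zero_add]

lemma labels_loop :
    ∀ (suf : List Int) (d : PySem.Dict Int Int) (acc pre : List Int),
      (∀ c : Int, d.contains c = true ↔ c ∈ pre) →
      (∀ c ∈ pre, d.getD c 0 = ((PySem.List.dedup pre).idxOf c : Int)) →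
      d.size = (PySem.List.dedup pre).length →
      (suf.foldl (fun (st : PySem.Dict Int Int × List Int) c =>
          let labels := if PySem.Dict.contains st.1 c then st.1
                        else PySem.Dict.insert st.1 c (PySem.Dict.size st.1 : Int)
          (labels, st.2 ++ [PySem.Dict.getD labels c 0])) (d, acc)).2
        = acc ++ suf.map (fun c => (((PySem.List.dedup (pre ++ suf)).idxOf c : Nat) : Int)) := by
  intro suf
  induction suf with
  | nil => intro d acc pre _ _ _; simp
  | cons c suf ih =>
    intro d acc pre hc hg hs
    simp only [List.foldl_cons]
    by_cases hin : d.contains c = true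
    · have hcpre : c ∈ pre := (hc c).1 hin
      have hd1 : PySem.List.dedup (pre ++ [c]) = PySem.List.dedup pre := by
        rw [dedup_concat, if_pos hcpre]
      have hval : PySem.Dict.getD d c 0
          = (((PySem.List.dedup (pre ++ c :: suf)).idxOf c : Nat) : Int) := by
        rw [List.append_cons, dedup_idxOf_prefix suf (List.mem_append_left _ hcpre), hd1]
        exact hg c hcpre
      rw [if_pos hin]
      have := ih d (acc ++ [PySem.Dict.getD d c 0]) (pre ++ [c])
        (fun c' => by
          rw [hc c', List.mem_append, List.mem_singleton]
          constructor
          · exact fun h => Or.inl h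
          · rintro (h | rfl)
            · exact h
            · exact hcpre)
        (fun c' hc' => by
          rw [hd1]
          apply hg
          rcases List.mem_append.1 hc' with h | h
          · exact h
          · rw [List.mem_singleton] at h
            exact h ▸ hcpre)
        (by rw [hd1]; exact hs)
      rw [this, hval]
      rw [← List.append_cons pre c suf]
      simp [List.append_assoc]
    · have hcpre : c ∉ pre := fun h => hin ((hc c).2 h)
      have hcd : c ∉ PySem.List.dedup pre := fun h => hcpre ((PySem.List.mem_dedup _ _).1 h)
      have hd1 : PySem.List.dedup (pre ++ [c]) = PySem.List.dedup pre ++ [c] := by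
        rw [dedup_concat, if_neg hcpre]
      rw [if_neg hin]
      have hval : PySem.Dict.getD (PySem.Dict.insert d c (PySem.Dict.size d : Int)) c 0
          = (((PySem.List.dedup (pre ++ c :: suf)).idxOf c : Nat) : Int) := by
        rw [PySem.Dict.getD_insert_self]
        rw [List.append_cons, dedup_idxOf_prefix suf
          (List.mem_append_right _ (List.mem_singleton_self _)), hd1]
        rw [List.idxOf_append, if_neg hcd, List.idxOf_cons_self]
        rw [hs]
        simp
      have := ih (PySem.Dict.insert d c (PySem.Dict.size d : Int))
        (acc ++ [PySem.Dict.getD (PySem.Dict.insert d c (PySem.Dict.size d : Int)) c 0])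
        (pre ++ [c])
        (fun c' => by
          rw [PySem.Dict.contains_insert, List.mem_append, List.mem_singleton]
          constructor
          · intro h
            rcases Bool.or_eq_true_iff.1 h with h | h
            · exact Or.inr (by simpa using h)
            · exact Or.inl ((hc c').1 h)
          · rintro (h | rfl)
            · exact Bool.or_eq_true_iff.2 (Or.inr ((hc c').2 h))
            · exact Bool.or_eq_true_iff.2 (Or.inl (by simp))
        )
        (fun c' hc' => by
          rw [hd1]
          rcases List.mem_append.1 hc' with h | h
          · have hne : c' ≠ c := fun he => hcpre (he ▸ h)
            rw [PySem.Dict.getD_insert_of_ne _ _ _ hne]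
            rw [List.idxOf_append, if_pos ((PySem.List.mem_dedup _ _).2 h)]
            exact hg c' h
          · rw [List.mem_singleton] at h
            subst h
            rw [PySem.Dict.getD_insert_self]
            rw [List.idxOf_append, if_neg hcd, List.idxOf_cons_self, hs]
            simp)
        (by
          rw [PySem.Dict.size_insert, if_neg (by simpa using hin), hd1]
          rw [List.length_append, hs]
          simp)
      rw [this, hval]
      rw [← List.append_cons pre c suf]
      simp [List.append_assoc]

lemma get_orbits_alt_eq {automorphisms : List (List Int)} {num_nodes : Int}
    (h0 : 0 < num_nodes) :
    get_orbits_alt automorphisms num_nodes = pvOut automorphisms num_nodes := by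
  unfold get_orbits_alt
  rw [if_neg (by omega)]
  have hc : ∀ c : Int, (PySem.Dict.empty : PySem.Dict Int Int).contains c = true ↔ c ∈ ([] : List Int) := by
    intro c
    have hfalse : (PySem.Dict.empty : PySem.Dict Int Int).contains c = false := rfl
    rw [hfalse]
    simp
  have := labels_loop (pvComp automorphisms num_nodes) PySem.Dict.empty [] []
    hc (fun c h => absurd h (List.not_mem_nil)) rfl
  rw [this]
  unfold pvOut
  simp

-- ===== VERDICT (by name: the statement is the Claim_ definition above) =====
theorem get_orbits_spec : Claim_equal_get_orbits := by
  intro automorphisms num_nodes _hdom hpre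
  unfold Spec_get_orbits
  by_cases h0 : 0 < num_nodes
  · rw [get_orbits_eq hpre h0, get_orbits_alt_eq h0]
  · have hle : num_nodes ≤ 0 := by omega
    have h1 : get_orbits_alt automorphisms num_nodes = [] := by
      unfold get_orbits_alt; simp [hle]
    have h2 : get_orbits automorphisms num_nodes = [] := by
      unfold get_orbits pvScan
      rw [PySem.List.pyRange_one_eq_nil hle]
      simp [PySem.List.pyRepeat_singleton, Int.toNat_of_nonpos hle]
    rw [h1, h2]
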